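-- pv_equiv track=rewrite | github.com/DivineJK/MyPythonLibrary | MathLibrary/Convolution/Convolution_or.py | fzt0
-- ===== SOURCE A (Python) =====
-- def fzt0(f, modulo=0):
--     n = len(f)
--     bin_top = 1
--     depth = 0
--     while bin_top < n:
--         depth += 1
--         bin_top <<= 1
--     res = [0]*bin_top
--     for i in range(n):
--         res[i] = f[i]
--     for i in range(depth):
--         offset = 1 << (i+1)
--         for j in range(0, bin_top, offset):
--             for k in range(1<<i):
--                 res[j+k+(1<<i)] += res[j+k]
--                 if modulo:
--                     if res[j+k+(1<<i)] >= modulo: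
--                         res[j+k+(1<<i)] -= modulo
--     return res
-- ===== SOURCE B (Python) =====
-- def fzt0(f, modulo=0):
--     bin_top = 1
--     while bin_top < len(f):
--         bin_top <<= 1
--     res = list(f) + [0] * (bin_top - len(f))
--
--     def zeta(seg):
--         if len(seg) <= 1:
--             return seg
--         h = len(seg) // 2
--         lo = zeta(seg[:h])
--         hi = zeta(seg[h:])
--         out = []
--         for a, b in zip(lo, hi):
--             c = b + a
--             if modulo and c >= modulo:
--                 c -= modulo
--             out.append(c)
--         return lo + out
--
--     return zeta(res)
-- ===== Notes on version B (the rewrite author's own statement) =====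
-- stated objective: alternative
-- what changed: Replaces the iterative bottom-up triple loop over levels/blocks/offsets (in-place array updates) by a recursive divide-and-conquer zeta transform: pad to the next power of two, then recursively transform the two halves and zip the lower half into the upper half with the same conditional subtract.
import Mathlib
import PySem

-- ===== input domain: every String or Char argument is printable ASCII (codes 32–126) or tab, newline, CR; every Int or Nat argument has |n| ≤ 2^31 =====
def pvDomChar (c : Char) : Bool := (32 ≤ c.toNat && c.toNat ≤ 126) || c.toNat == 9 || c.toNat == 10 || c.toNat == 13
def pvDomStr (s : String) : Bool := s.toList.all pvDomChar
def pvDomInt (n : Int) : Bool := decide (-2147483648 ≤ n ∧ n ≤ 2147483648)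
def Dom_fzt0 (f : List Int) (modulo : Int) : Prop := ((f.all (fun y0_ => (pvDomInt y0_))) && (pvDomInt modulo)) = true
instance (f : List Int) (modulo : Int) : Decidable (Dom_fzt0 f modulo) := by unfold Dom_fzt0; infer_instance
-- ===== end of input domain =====

-- B replaces A's iterative bottom-up level/block/offset triple loop by a recursive
-- divide-and-conquer zeta transform (alternative decomposition, same asymptotic cost).

-- ===== PORT A =====
-- while bin_top < n: depth += 1; bin_top <<= 1   — fueled; fuel n is sufficient since
-- bin_top ≥ 1 doubles each step (proved in fzt0_top_ge below)
def fzt0_top (fuel n bin_top depth : Nat) : Nat × Nat :=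
  match fuel with
  | 0 => (bin_top, depth)
  | fuel + 1 =>
    if bin_top < n then fzt0_top fuel n (bin_top * 2) (depth + 1) else (bin_top, depth)

def fzt0 (f : List Int) (modulo : Int) : List Int :=
  let n := f.length
  let bd := fzt0_top n n 1 0
  let bin_top := bd.1
  let depth := bd.2
  -- res = [0]*bin_top; for i in range(n): res[i] = f[i]   (i always in range of f)
  let res := (List.range n).foldl (fun r i => r.set i (f.getD i 0)) (List.replicate bin_top (0 : Int))
  (List.range depth).foldl (fun r i =>
    (PySem.List.pyRange 0 (bin_top : Int) ((2 : Int) ^ (i + 1))).foldl (fun r j =>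
      (List.range (2 ^ i)).foldl (fun r (k : Nat) =>
        let v := PySem.List.pyGetD r (j + (k : Int) + (2 : Int) ^ i) 0 + PySem.List.pyGetD r (j + (k : Int)) 0
        let v2 := if modulo ≠ 0 then (if v ≥ modulo then v - modulo else v) else v
        PySem.List.pySetD r (j + (k : Int) + (2 : Int) ^ i) v2) r) r) res

-- ===== PORT B =====
def fzt0_alt_top (fuel n bin_top : Nat) : Nat :=
  match fuel with
  | 0 => bin_top
  | fuel + 1 => if bin_top < n then fzt0_alt_top fuel n (bin_top * 2) else bin_top

def fzt0_comb (m : Int) (lo hi : List Int) : List Int :=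
  List.zipWith (fun a b => let c := b + a; if m ≠ 0 ∧ c ≥ m then c - m else c) lo hi

def fzt0_zeta (m : Int) (seg : List Int) : List Int :=
  if _h : seg.length ≤ 1 then seg
  else
    let hlf := seg.length / 2
    let lo := fzt0_zeta m (seg.take hlf)
    let hi := fzt0_zeta m (seg.drop hlf)
    lo ++ fzt0_comb m lo hi
termination_by seg.length
decreasing_by
  · simp only [List.length_take]; omega
  · simp only [List.length_drop]; omega

def fzt0_alt (f : List Int) (modulo : Int) : List Int :=
  let bin_top := fzt0_alt_top f.length f.length 1
  fzt0_zeta modulo (f ++ List.replicate (bin_top - f.length) 0)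

-- ===== PRECONDITION & SPEC =====
def Spec_fzt0 (f : List Int) (modulo : Int) (out : List Int) : Prop := out = fzt0_alt f modulo
instance (f : List Int) (modulo : Int) (out : List Int) : Decidable (Spec_fzt0 f modulo out) := by unfold Spec_fzt0; infer_instance

-- ===== CLAIM (what is proved, stated in full; the proofs are below) =====
def Claim_equal_fzt0 : Prop := ∀ (f : List Int) (modulo : Int), Dom_fzt0 f modulo → Spec_fzt0 f modulo (fzt0 f modulo)

-- ===== LEMMAS AND PROOFS =====

-- proof-side functional views of A's loops
def pairUpd (m : Int) (r : List Int) (s t : Nat) : List Int :=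
  let v := r.getD t 0 + r.getD s 0
  let v2 := if m ≠ 0 then (if v ≥ m then v - m else v) else v
  r.set t v2

def innerF (m : Int) (c off j : Nat) (r : List Int) : List Int :=
  (List.range c).foldl (fun r k => pairUpd m r (j + k) (j + k + off)) r

def levelN (m : Int) (i q : Nat) (r : List Int) : List Int :=
  (List.range q).foldl (fun r b => innerF m (2 ^ i) (2 ^ i) (2 ^ (i + 1) * b) r) r

def iterN (m : Int) (d : Nat) (r : List Int) : List Int :=
  (List.range d).foldl (fun r i => levelN m i (2 ^ (d - 1 - i)) r) r

-- while-loop facts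
theorem fzt0_top_fst (fuel n b d : Nat) : (fzt0_top fuel n b d).1 = fzt0_alt_top fuel n b := by
  induction fuel generalizing b d with
  | zero => rfl
  | succ fuel ih => simp only [fzt0_top, fzt0_alt_top]; split <;> simp [ih]

theorem fzt0_top_pow (fuel n b d : Nat) (h : b = 2 ^ d) :
    (fzt0_top fuel n b d).1 = 2 ^ (fzt0_top fuel n b d).2 := by
  induction fuel generalizing b d with
  | zero => simpa [fzt0_top] using h
  | succ fuel ih =>
    simp only [fzt0_top]; split
    · exact ih (b * 2) (d + 1) (by subst h; ring)
    · simpa using h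
  
theorem fzt0_top_ge (fuel n b d : Nat) (hb : 1 ≤ b) (hf : n ≤ b + fuel) :
    n ≤ (fzt0_top fuel n b d).1 := by
  induction fuel generalizing b d with
  | zero => simpa [fzt0_top] using hf
  | succ fuel ih =>
    simp only [fzt0_top]; split
    · exact ih (b * 2) (d + 1) (by omega) (by omega)
    · omega

theorem pad_eq (f : List Int) (k bin : Nat) (hk : k ≤ f.length) (hb : k ≤ bin) :
    (List.range k).foldl (fun r i => r.set i (f.getD i 0)) (List.replicate bin (0 : Int))
      = f.take k ++ List.replicate (bin - k) 0 := by
  induction k with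
  | zero => simp
  | succ k ih =>
    rw [List.range_succ, List.foldl_append, ih (by omega) (by omega)]
    have hk' : (f.take k).length = k := by simp; omega
    have hrep : List.replicate (bin - k) (0 : Int) = 0 :: List.replicate (bin - (k + 1)) 0 := by
      have : bin - k = (bin - (k + 1)) + 1 := by omega
      rw [this, List.replicate_succ]
    have htk : f.take (k + 1) = f.take k ++ [f.getD k 0] := by
      rw [List.take_succ]
      congr 1
      simp [List.getD, List.getElem?_eq_getElem (by omega : k < f.length)]
    rw [List.foldl_cons, List.foldl_nil, hrep, List.set_append, htk]
    simp [hk']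

-- lengths are preserved
theorem pairUpd_length (m : Int) (r : List Int) (s t : Nat) : (pairUpd m r s t).length = r.length := by
  simp [pairUpd]

theorem innerF_length (m : Int) (c off j : Nat) (r : List Int) : (innerF m c off j r).length = r.length := by
  unfold innerF
  induction List.range c generalizing r with
  | nil => rfl
  | cons a l ih => simp [List.foldl_cons, ih, pairUpd_length]

theorem levelN_length (m : Int) (i q : Nat) (r : List Int) : (levelN m i q r).length = r.length := by
  unfold levelN
  induction List.range q generalizing r with
  | nil => rfl
  | cons a l ih => simp [List.foldl_cons, ih, innerF_length]

theorem iterN_length (m : Int) (d : Nat) (r : List Int) : (iterN m d r).length = r.length := by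
  unfold iterN
  induction List.range d generalizing r with
  | nil => rfl
  | cons a l ih => simp [List.foldl_cons, ih, levelN_length]

-- the inner k-loop on one block is a zip of the two half-blocks
theorem getD_mid (X : List Int) (y : Int) (Z : List Int) (n : Nat) (h : n = X.length) :
    (X ++ y :: Z).getD n 0 = y := by
  subst h
  rw [List.getD_append_right _ _ _ _ (le_refl _)]
  simp

theorem set_mid (X : List Int) (y v : Int) (Z : List Int) (n : Nat) (h : n = X.length) :
    (X ++ y :: Z).set n v = X ++ v :: Z := by
  subst h
  rw [List.set_append]
  simp

theorem innerF_block (m : Int) : ∀ (c off : Nat) (P lo M hi S : List Int),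
    lo.length = c → hi.length = c → M.length = off - c → c ≤ off →
    innerF m c off P.length (P ++ lo ++ M ++ hi ++ S)
      = P ++ lo ++ M ++ fzt0_comb m lo hi ++ S := by
  intro c
  induction c with
  | zero =>
    intro off P lo M hi S hlo hhi hM hc
    rw [List.length_eq_zero_iff] at hlo hhi
    subst hlo; subst hhi
    simp [innerF, fzt0_comb]
  | succ c ih =>
    intro off P lo M hi S hlo hhi hM hc
    obtain ⟨lo₁, a, rfl⟩ : ∃ L x, lo = L ++ [x] := by
      rcases List.eq_nil_or_concat lo with h | ⟨L, x, h⟩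
      · rw [h] at hlo; simp at hlo
      · exact ⟨L, x, by simpa using h⟩
    obtain ⟨hi₁, b, rfl⟩ : ∃ L x, hi = L ++ [x] := by
      rcases List.eq_nil_or_concat hi with h | ⟨L, x, h⟩
      · rw [h] at hhi; simp at hhi
      · exact ⟨L, x, by simpa using h⟩
    have hlo₁ : lo₁.length = c := by simp at hlo; omega
    have hhi₁ : hi₁.length = c := by simp at hhi; omega
    have hcomb : (fzt0_comb m lo₁ hi₁).length = c := by
      simp [fzt0_comb, hlo₁, hhi₁]
    unfold innerF
    rw [List.range_succ, List.foldl_append]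
    have e1 : P ++ (lo₁ ++ [a]) ++ M ++ (hi₁ ++ [b]) ++ S
        = P ++ lo₁ ++ (a :: M) ++ hi₁ ++ (b :: S) := by simp
    rw [e1]
    have ih' := ih off P lo₁ (a :: M) hi₁ (b :: S) hlo₁ hhi₁ (by simp; omega) (by omega)
    unfold innerF at ih'
    rw [ih']
    simp only [List.foldl_cons, List.foldl_nil]
    have e2 : P ++ lo₁ ++ (a :: M) ++ fzt0_comb m lo₁ hi₁ ++ (b :: S)
        = (P ++ lo₁) ++ a :: (M ++ fzt0_comb m lo₁ hi₁ ++ (b :: S)) := by simp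
    have e3 : P ++ lo₁ ++ (a :: M) ++ fzt0_comb m lo₁ hi₁ ++ (b :: S)
        = (P ++ lo₁ ++ (a :: M) ++ fzt0_comb m lo₁ hi₁) ++ b :: S := by simp
    have hgs : (P ++ lo₁ ++ (a :: M) ++ fzt0_comb m lo₁ hi₁ ++ (b :: S)).getD (P.length + c) 0 = a := by
      rw [e2]; exact getD_mid _ _ _ _ (by simp [hlo₁])
    have hgt : (P ++ lo₁ ++ (a :: M) ++ fzt0_comb m lo₁ hi₁ ++ (b :: S)).getD (P.length + c + off) 0 = b := by
      rw [e3]; exact getD_mid _ _ _ _ (by simp [hlo₁, hcomb]; omega)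
    unfold pairUpd
    simp only [hgs, hgt]
    rw [e3, set_mid _ _ _ _ _ (by simp [hlo₁, hcomb]; omega)]
    have hcombapp : fzt0_comb m (lo₁ ++ [a]) (hi₁ ++ [b])
        = fzt0_comb m lo₁ hi₁ ++ [if m ≠ 0 ∧ b + a ≥ m then b + a - m else b + a] := by
      unfold fzt0_comb
      rw [List.zipWith_append (h := by omega)]
      rfl
    have hval : (if m ≠ 0 then (if b + a ≥ m then b + a - m else b + a) else b + a)
        = (if m ≠ 0 ∧ b + a ≥ m then b + a - m else b + a) := by
      by_cases h1 : m ≠ 0 <;> by_cases h2 : b + a ≥ m <;> simp [h1, h2]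
    rw [hval, hcombapp]
    simp

-- locality of the inner loop
theorem pairUpd_left (m : Int) (X Y : List Int) (s t : Nat) (hs : s < X.length) (ht : t < X.length) :
    pairUpd m (X ++ Y) s t = pairUpd m X s t ++ Y := by
  unfold pairUpd
  simp only [List.getD_append _ _ _ _ ht, List.getD_append _ _ _ _ hs, List.set_append]
  simp [ht]

theorem pairUpd_right (m : Int) (X Y : List Int) (s t : Nat) (hs : X.length ≤ s) (ht : X.length ≤ t) :
    pairUpd m (X ++ Y) s t = X ++ pairUpd m Y (s - X.length) (t - X.length) := by
  unfold pairUpd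
  simp only [List.getD_append_right _ _ _ _ ht, List.getD_append_right _ _ _ _ hs, List.set_append]
  simp [Nat.not_lt.mpr ht]

theorem innerF_left (m : Int) (c off j : Nat) (X Y : List Int) (h : j + c + off ≤ X.length) :
    innerF m c off j (X ++ Y) = innerF m c off j X ++ Y := by
  unfold innerF
  induction c with
  | zero => simp
  | succ c ih =>
    rw [List.range_succ, List.foldl_append, List.foldl_append, ih (by omega)]
    simp only [List.foldl_cons, List.foldl_nil]
    have hl : (List.foldl (fun r k => pairUpd m r (j + k) (j + k + off)) X (List.range c)).length = X.length :=
      innerF_length m c off j X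
    rw [pairUpd_left] <;> omega

theorem innerF_right (m : Int) (c off j : Nat) (X Y : List Int) (h : X.length ≤ j) :
    innerF m c off j (X ++ Y) = X ++ innerF m c off (j - X.length) Y := by
  unfold innerF
  induction c with
  | zero => simp
  | succ c ih =>
    rw [List.range_succ, List.foldl_append, List.foldl_append, ih]
    simp only [List.foldl_cons, List.foldl_nil]
    rw [pairUpd_right _ _ _ _ _ (by omega) (by omega)]
    congr 2 <;> omega

-- one level splits over two halves
theorem levelN_left (m : Int) (i : Nat) : ∀ (q : Nat) (lo hi : List Int), 2 ^ (i + 1) * q ≤ lo.length →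
    (List.range q).foldl (fun r b => innerF m (2 ^ i) (2 ^ i) (2 ^ (i + 1) * b) r) (lo ++ hi)
      = (List.range q).foldl (fun r b => innerF m (2 ^ i) (2 ^ i) (2 ^ (i + 1) * b) r) lo ++ hi := by
  intro q
  induction q with
  | zero => intro lo hi _; simp
  | succ q ih =>
    intro lo hi h
    have h2 : (2 : Nat) ^ (i + 1) = 2 ^ i + 2 ^ i := by rw [pow_succ]; omega
    have hq : 2 ^ (i + 1) * q ≤ lo.length :=
      le_trans (Nat.mul_le_mul_left _ (by omega)) h
    have h3 : 2 ^ (i + 1) * (q + 1) = 2 ^ (i + 1) * q + 2 ^ i + 2 ^ i := by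
      rw [Nat.mul_add, h2]; omega
    rw [List.range_succ, List.foldl_append, List.foldl_append, ih lo hi hq]
    simp only [List.foldl_cons, List.foldl_nil]
    have hl : (List.foldl (fun r b => innerF m (2 ^ i) (2 ^ i) (2 ^ (i + 1) * b) r) lo (List.range q)).length = lo.length :=
      levelN_length m i q lo
    rw [innerF_left _ _ _ _ _ _ (by omega)]

theorem levelN_shift (m : Int) (c off L st : Nat) : ∀ (q : Nat) (X hi : List Int), X.length = L →
    (List.range q).foldl (fun r b => innerF m c off (L + st * b) r) (X ++ hi)
      = X ++ (List.range q).foldl (fun r b => innerF m c off (st * b) r) hi := by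
  intro q
  induction q with
  | zero => intro X hi _; simp
  | succ q ih =>
    intro X hi hX
    rw [List.range_succ, List.foldl_append, List.foldl_append, ih X hi hX]
    simp only [List.foldl_cons, List.foldl_nil]
    rw [innerF_right _ _ _ _ _ _ (by omega)]
    have : L + st * q - X.length = st * q := by omega
    rw [this]

theorem levelN_split (m : Int) (i q : Nat) (lo hi : List Int)
    (hlo : lo.length = 2 ^ (i + 1) * q) :
    levelN m i (q + q) (lo ++ hi) = levelN m i q lo ++ levelN m i q hi := by
  unfold levelN
  rw [List.range_add, List.foldl_append, List.foldl_map,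
    levelN_left m i q lo hi (le_of_eq hlo.symm)]
  have ef : (fun (r : List Int) (b : Nat) => innerF m (2 ^ i) (2 ^ i) (2 ^ (i + 1) * (q + b)) r)
      = fun r b => innerF m (2 ^ i) (2 ^ i) (lo.length + 2 ^ (i + 1) * b) r := by
    funext r b
    rw [Nat.mul_add, hlo]
  rw [ef]
  exact levelN_shift m (2 ^ i) (2 ^ i) lo.length (2 ^ (i + 1)) q _ hi (levelN_length m i q lo)

-- all levels below d split over the two halves of a length-2^(d+1) array
theorem iter_split_aux (m : Int) (d : Nat) : ∀ (l : List Nat), (∀ i ∈ l, i < d) →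
    ∀ (lo hi : List Int), lo.length = 2 ^ d → hi.length = 2 ^ d →
    l.foldl (fun r i => levelN m i (2 ^ (d - i)) r) (lo ++ hi)
      = l.foldl (fun r i => levelN m i (2 ^ (d - 1 - i)) r) lo
        ++ l.foldl (fun r i => levelN m i (2 ^ (d - 1 - i)) r) hi := by
  intro l
  induction l with
  | nil => intro _ lo hi _ _; simp
  | cons i l ih =>
    intro hmem lo hi hlo hhi
    have hi_lt : i < d := hmem i (by simp)
    have hqq : (2 : Nat) ^ (d - i) = 2 ^ (d - 1 - i) + 2 ^ (d - 1 - i) := by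
      have : d - i = (d - 1 - i) + 1 := by omega
      rw [this, pow_succ]; omega
    have hmul : (2 : Nat) ^ (i + 1) * 2 ^ (d - 1 - i) = 2 ^ d := by
      rw [← pow_add]; congr 1; omega
    simp only [List.foldl_cons]
    rw [hqq, levelN_split m i (2 ^ (d - 1 - i)) lo hi (by omega)]
    exact ih (fun j hj => hmem j (by simp [hj])) _ _
      (by rw [levelN_length]; exact hlo) (by rw [levelN_length]; exact hhi)

theorem iter_split (m : Int) (d : Nat) (lo hi : List Int)
    (hlo : lo.length = 2 ^ d) (hhi : hi.length = 2 ^ d) :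
    (List.range d).foldl (fun r i => levelN m i (2 ^ (d - i)) r) (lo ++ hi)
      = iterN m d lo ++ iterN m d hi := by
  exact iter_split_aux m d (List.range d) (fun i hi => List.mem_range.mp hi) lo hi hlo hhi

-- main: the iterative transform is the recursive one
theorem iterN_eq_zeta (m : Int) : ∀ (d : Nat) (r : List Int), r.length = 2 ^ d →
    iterN m d r = fzt0_zeta m r := by
  intro d
  induction d with
  | zero =>
    intro r h
    rw [fzt0_zeta]
    simp only [h]
    simp [iterN]
  | succ d ih =>
    intro r h
    have hpow : (1 : Nat) ≤ 2 ^ d := Nat.one_le_two_pow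
    have h2 : r.length = 2 ^ d + 2 ^ d := by rw [h, pow_succ]; omega
    have hlo : (r.take (2 ^ d)).length = 2 ^ d := by simp; omega
    have hhi : (r.drop (2 ^ d)).length = 2 ^ d := by simp; omega
    have hr : r = r.take (2 ^ d) ++ r.drop (2 ^ d) := (List.take_append_drop _ _).symm
    -- iterative side
    have hiter : iterN m (d + 1) r
        = iterN m d (r.take (2 ^ d)) ++ fzt0_comb m (iterN m d (r.take (2 ^ d))) (iterN m d (r.drop (2 ^ d))) := by
      unfold iterN
      rw [List.range_succ, List.foldl_append]
      simp only [Nat.add_sub_cancel]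
      conv_lhs => rw [hr]
      rw [iter_split m d _ _ hlo hhi]
      simp only [List.foldl_cons, List.foldl_nil]
      have hq1 : d - d = 0 := by omega
      rw [hq1]
      show levelN m d (2 ^ 0) (iterN m d (r.take (2 ^ d)) ++ iterN m d (r.drop (2 ^ d))) = _
      unfold levelN
      simp only [pow_zero, List.range_one, List.foldl_cons, List.foldl_nil, Nat.mul_zero]
      have hb := innerF_block m (2 ^ d) (2 ^ d) [] (iterN m d (r.take (2 ^ d))) []
        (iterN m d (r.drop (2 ^ d))) [] (by rw [iterN_length]; exact hlo)
        (by rw [iterN_length]; exact hhi) (by simp) (le_refl _)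
      simp only [List.nil_append, List.append_nil, List.length_nil] at hb
      exact hb
    rw [hiter]
    -- recursive side
    rw [fzt0_zeta]
    have hnle : ¬ r.length ≤ 1 := by omega
    simp only [hnle, dite_false]
    have hhlf : r.length / 2 = 2 ^ d := by omega
    rw [hhlf, ih _ hlo, ih _ hhi]

-- A's level-i pass over pyRange equals the functional level
theorem portLevel_eq (m : Int) (d i : Nat) (hid : i < d) (r : List Int) :
    (PySem.List.pyRange 0 (((2 ^ d : Nat) : Int)) ((2 : Int) ^ (i + 1))).foldl (fun r j =>
      (List.range (2 ^ i)).foldl (fun r (k : Nat) =>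
        let v := PySem.List.pyGetD r (j + (k : Int) + (2 : Int) ^ i) 0 + PySem.List.pyGetD r (j + (k : Int)) 0
        let v2 := if m ≠ 0 then (if v ≥ m then v - m else v) else v
        PySem.List.pySetD r (j + (k : Int) + (2 : Int) ^ i) v2) r) r
      = levelN m i (2 ^ (d - 1 - i)) r := by
  have hpos : (0 : Int) < (2 : Int) ^ (i + 1) := by positivity
  have hone : (1 : Int) ≤ (2 : Int) ^ (i + 1) := one_le_pow₀ (by norm_num)
  have hlt : (0 : Int) < ((2 ^ d : Nat) : Int) := by positivity
  have hsplit : (2 : Nat) ^ d = 2 ^ (i + 1) * 2 ^ (d - 1 - i) := by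
    rw [← pow_add]; congr 1; omega
  have hnum : ((2 ^ d : Nat) : Int) - 0 + 2 ^ (i + 1) - 1
      = ((2 : Int) ^ (i + 1) - 1) + (2 : Int) ^ (i + 1) * ((2 ^ (d - 1 - i) : Nat) : Int) := by
    push_cast [hsplit]; ring
  have hq : ((((2 ^ d : Nat) : Int) - 0 + 2 ^ (i + 1) - 1) / 2 ^ (i + 1)).toNat = 2 ^ (d - 1 - i) := by
    rw [hnum, Int.add_mul_ediv_left _ _ hpos.ne',
      Int.ediv_eq_zero_of_lt (by omega) (by omega)]
    rw [zero_add, Int.toNat_natCast]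
  rw [PySem.List.pyRange_of_pos 0 _ hpos, if_pos hlt, hq, List.foldl_map]
  unfold levelN
  apply PySem.List.foldl_congr_mem
  intro acc b _
  unfold innerF
  apply PySem.List.foldl_congr_mem
  intro r' k _
  have hidx2 : (0 : Int) + 2 ^ (i + 1) * (b : Int) + (k : Int) = ((2 ^ (i + 1) * b + k : Nat) : Int) := by
    push_cast; ring
  have hidx1 : ((2 ^ (i + 1) * b + k : Nat) : Int) + (2 : Int) ^ i
      = ((2 ^ (i + 1) * b + k + 2 ^ i : Nat) : Int) := by push_cast; ring
  unfold pairUpd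
  simp only [hidx2, hidx1, PySem.List.pyGetD_natCast, PySem.List.pySetD_natCast]

-- ===== VERDICT (by name: the statement is the Claim_ definition above) =====
theorem fzt0_spec : Claim_equal_fzt0 := by
  intro f modulo _
  unfold Spec_fzt0 fzt0 fzt0_alt
  dsimp only
  set B := fzt0_top f.length f.length 1 0 with hB
  have hbt : B.1 = 2 ^ B.2 := fzt0_top_pow _ _ _ _ (by norm_num)
  have hge : f.length ≤ B.1 := fzt0_top_ge _ _ _ _ (by omega) (by omega)
  have halt : fzt0_alt_top f.length f.length 1 = B.1 := (fzt0_top_fst _ _ _ _).symm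
  rw [halt, pad_eq f f.length B.1 (le_refl _) hge]
  set R := f ++ List.replicate (B.1 - f.length) 0 with hR
  have hRlen : R.length = 2 ^ B.2 := by
    rw [hR]; simp; omega
  rw [hbt]
  have hlev : (List.range B.2).foldl (fun r i =>
      (PySem.List.pyRange 0 (((2 ^ B.2 : Nat) : Int)) ((2 : Int) ^ (i + 1))).foldl (fun r j =>
        (List.range (2 ^ i)).foldl (fun r (k : Nat) =>
          let v := PySem.List.pyGetD r (j + (k : Int) + (2 : Int) ^ i) 0 + PySem.List.pyGetD r (j + (k : Int)) 0
          let v2 := if modulo ≠ 0 then (if v ≥ modulo then v - modulo else v) else v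
          PySem.List.pySetD r (j + (k : Int) + (2 : Int) ^ i) v2) r) r) R = iterN modulo B.2 R := by
    unfold iterN
    apply PySem.List.foldl_congr_mem
    intro acc i hi
    exact portLevel_eq modulo B.2 i (List.mem_range.mp hi) acc
  rw [show List.take f.length f ++ List.replicate (2 ^ B.2 - f.length) (0 : Int) = R from by
    rw [hR, hbt, List.take_length]]
  exact hlev.trans (iterN_eq_zeta modulo B.2 R hRlen)
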